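-- pv_equiv track=rewrite | github.com/beeracademy/web | games/utils.py | format_sips
-- ===== SOURCE A (Python) =====
-- SIPS_BASE = 14
--
-- def format_sips(value):
--     res = []
--     while value > 0:
--         v = value % 14
--         if v < 10:
--             res.append(str(v))
--         else:
--             res.append(chr(ord("A") + (v - 10)))
--         value //= SIPS_BASE
--
--     return "".join(res[::-1])
-- ===== SOURCE B (Python) =====
-- DIGITS = "0123456789ABCD"
--
--
-- def format_sips(value):
--     if value <= 0:
--         return ""
--     return format_sips(value // 14) + DIGITS[value % 14]
-- ===== Notes on version B (the rewrite author's own statement) =====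
-- stated objective: simpler
-- what changed: Replaces the while-loop that collects low-order digits in a list and reverses/joins them with a direct recursion on the quotient that emits digits most-significant-first via a digit table, needing no list, no reversal and no chr/ord arithmetic.
import Mathlib
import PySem

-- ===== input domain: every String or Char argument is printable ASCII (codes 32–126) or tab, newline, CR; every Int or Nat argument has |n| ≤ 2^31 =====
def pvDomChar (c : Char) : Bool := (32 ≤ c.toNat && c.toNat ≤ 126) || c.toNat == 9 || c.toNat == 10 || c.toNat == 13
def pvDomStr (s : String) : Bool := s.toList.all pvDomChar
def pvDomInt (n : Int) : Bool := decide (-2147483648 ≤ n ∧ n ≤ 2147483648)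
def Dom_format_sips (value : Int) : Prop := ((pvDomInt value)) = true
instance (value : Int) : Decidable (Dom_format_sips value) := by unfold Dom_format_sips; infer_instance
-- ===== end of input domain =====

-- B replaces A's collect-low-digits-then-reverse-and-join loop by a direct recursion on the
-- quotient emitting digits most-significant-first from a digit table (objective: simpler).

-- termination helper cited by the recursive ports
theorem pv_floordiv14_lt (v : Int) (h : 0 < v) :
    (PySem.Int.floordiv v 14).toNat < v.toNat := by
  rw [PySem.Int.floordiv_eq_ediv_of_pos (by norm_num)]
  omega

-- ===== PORT A =====
-- one iteration's appended digit: str(v) if v < 10 else chr(ord('A') + (v - 10))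
def aDigit (v : Int) : String :=
  if v < 10 then PySem.Int.toStr v
  else String.ofList [Char.ofNat ('A'.toNat + (v - 10).toNat)]

-- the while loop, state = (value, res)
def aLoop (value : Int) (res : List String) : List String :=
  if h : 0 < value then
    aLoop (PySem.Int.floordiv value 14) (res ++ [aDigit (PySem.Int.mod value 14)])
  else res
termination_by value.toNat
decreasing_by exact pv_floordiv14_lt value h

-- res[::-1] is ported as List.reverse (exact for a full step -1 slice)
def format_sips (value : Int) : String :=
  PySem.Str.join "" ((aLoop value []).reverse)

-- ===== PORT B =====
def bDIGITS : String := "0123456789ABCD"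

-- DIGITS[value % 14]: Python's 1-char string is PySem's Char; the index is always in range
-- when 0 < value, so the Option is always some and Option.toList yields that one char
def format_sips_alt (value : Int) : String :=
  if h : value ≤ 0 then ""
  else
    format_sips_alt (PySem.Int.floordiv value 14) ++
      String.ofList (PySem.Str.pyGet? bDIGITS (PySem.Int.mod value 14)).toList
termination_by value.toNat
decreasing_by exact pv_floordiv14_lt value (by omega)

-- ===== PRECONDITION & SPEC =====
def Spec_format_sips (value : Int) (out : String) : Prop := out = format_sips_alt value
instance (value : Int) (out : String) : Decidable (Spec_format_sips value out) := by unfold Spec_format_sips; infer_instance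

-- ===== CLAIM (what is proved, stated in full; the proofs are below) =====
def Claim_equal_format_sips : Prop := ∀ (value : Int), Dom_format_sips value → Spec_format_sips value (format_sips value)

-- ===== LEMMAS AND PROOFS =====

-- the list of digit-strings A's loop produces, low-order first
def digitsLow (value : Int) : List String :=
  if h : 0 < value then
    aDigit (PySem.Int.mod value 14) :: digitsLow (PySem.Int.floordiv value 14)
  else []
termination_by value.toNat
decreasing_by exact pv_floordiv14_lt value h

theorem aLoop_eq (value : Int) (res : List String) :
    aLoop value res = res ++ digitsLow value := by
  induction value, res using aLoop.induct with
  | case1 v res h ih =>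
    rw [aLoop, dif_pos h, ih]
    conv_rhs => rw [digitsLow, dif_pos h]
    simp
  | case2 v res h =>
    rw [aLoop, dif_neg h]
    conv_rhs => rw [digitsLow, dif_neg h]
    simp

theorem chars_join_snoc (l : List (List Char)) (c : List Char) :
    PySem.Chars.join [] (l ++ [c]) = PySem.Chars.join [] l ++ c := by
  induction l with
  | nil => simp [PySem.Chars.join_singleton, PySem.Chars.join_nil]
  | cons x t ih =>
    cases t with
    | nil => simp [PySem.Chars.join_cons_cons, PySem.Chars.join_singleton]
    | cons y t' => simp [PySem.Chars.join_cons_cons] at ih ⊢; rw [ih]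

theorem join_append_singleton (xs : List String) (d : String) :
    PySem.Str.join "" (xs ++ [d]) = PySem.Str.join "" xs ++ d := by
  apply String.toList_inj.mp
  simp [PySem.Str.toList_join, chars_join_snoc]

theorem digit_eq (m : Int) (h0 : 0 ≤ m) (h14 : m < 14) :
    aDigit m = String.ofList (PySem.Str.pyGet? bDIGITS m).toList := by
  interval_cases m <;> decide

theorem main_eq (value : Int) :
    PySem.Str.join "" ((digitsLow value).reverse) = format_sips_alt value := by
  induction value using digitsLow.induct with
  | case1 v h ih =>
    have hm : PySem.Int.mod v 14 = v % 14 :=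
      PySem.Int.mod_eq_emod_of_pos (by norm_num)
    rw [digitsLow, dif_pos h, format_sips_alt]
    rw [dif_neg (by omega : ¬ v ≤ 0)]
    simp only [List.reverse_cons]
    rw [join_append_singleton, ih, digit_eq _ (by omega) (by omega)]
  | case2 v h =>
    rw [digitsLow, dif_neg h, format_sips_alt, dif_pos (by omega : v ≤ 0)]
    decide

-- ===== VERDICT (by name: the statement is the Claim_ definition above) =====
theorem format_sips_spec : Claim_equal_format_sips := by
  intro value _
  unfold Spec_format_sips format_sips
  rw [aLoop_eq, List.nil_append, main_eq]
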